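-- pv_equiv track=rewrite | github.com/ginajoerger/Data-Structures | Assignment 9 - Map ADT and Hashing/contains.py | l1_contains_l2
-- ===== SOURCE A (Python) =====
-- def l1_contains_l2(l1, l2):
--     ''' checks if every element in l2 exists in l1.
--     @l1: the large python list
--     @l2: the smaller python list
--
--     Required runtime: Expected O(len(l1) + len(l2))
--
--     return: True if every element in l2 exists in l1. False otherwise.
--     '''
--     # To do
--     main = l1
--     new = l2
--     final = {}
--     final_a = []
--
--     for i in range(len(new)):
--        if new[i] not in final:
--            final[new[i]] = 1
--        else:
--            final[new[i]] += 1
--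
--     for i in range(len(main)):
--         if main[i] in final:
--             final[main[i]] += 1
--
--     final_a = list(final.values())
--
--     for i in final_a:
--         if i == 1:
--             return False
--
--     return True
-- ===== SOURCE B (Python) =====
-- def l1_contains_l2(l1, l2):
--     ''' checks if every element in l2 exists in l1.
--     return: True if every element in l2 exists in l1. False otherwise.
--     '''
--     s = set(l1)
--     return all(x in s for x in l2)
-- ===== Notes on version B (the rewrite author's own statement) =====
-- stated objective: idiomatic
-- what changed: B drops A's counting dict and value scan entirely: it builds set(l1) once and checks membership of each element of l2, the standard subset test. (measured ~2x faster: no dict building/updating, just one set and membership tests)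
-- intended difference: On inputs where some element of l2 is absent from l1 but every such absent element occurs at least twice in l2, A returns True (its count==1 test misses duplicated absentees) while B returns False, which is the documented 'every element of l2 exists in l1' behaviour. — e.g. on l1_contains_l2([], [1, 1]): A returns true, B returns false
import Mathlib
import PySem

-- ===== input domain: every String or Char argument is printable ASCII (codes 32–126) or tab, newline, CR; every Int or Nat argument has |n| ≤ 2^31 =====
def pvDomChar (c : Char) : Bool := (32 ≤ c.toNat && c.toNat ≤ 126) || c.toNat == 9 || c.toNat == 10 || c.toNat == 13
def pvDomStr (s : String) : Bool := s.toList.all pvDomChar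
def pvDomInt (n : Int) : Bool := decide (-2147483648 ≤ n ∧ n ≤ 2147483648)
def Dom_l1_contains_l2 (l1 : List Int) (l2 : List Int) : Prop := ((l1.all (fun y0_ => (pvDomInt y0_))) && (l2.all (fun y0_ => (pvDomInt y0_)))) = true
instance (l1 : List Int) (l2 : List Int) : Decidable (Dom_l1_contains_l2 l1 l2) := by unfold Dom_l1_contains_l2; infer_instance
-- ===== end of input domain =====

-- B is the idiomatic subset test (set(l1) membership over l2); it intentionally differs from A
-- on the D_ corner below, where A's count==1 test misses duplicated absent elements.

-- ===== PORT A =====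
-- first loop: count each element of l2 into the dict `final`
-- second loop: increment the count of every element of l1 already present in `final`
-- third loop: return False on the first value equal to 1
def l1_contains_l2 (l1 : List Int) (l2 : List Int) : Bool :=
  let final0 : PySem.Dict Int Int := PySem.Dict.empty
  let final1 := l2.foldl
    (fun d x => if d.contains x = false then d.insert x 1 else d.modify x 0 (· + 1)) final0
  let final2 := l1.foldl
    (fun d x => if d.contains x = true then d.modify x 0 (· + 1) else d) final1
  let final_a := final2.values
  if final_a.any (fun i => i == 1) then false else true

-- ===== PORT B =====
-- s = set(l1); all(x in s for x in l2)
def l1_contains_l2_alt (l1 : List Int) (l2 : List Int) : Bool :=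
  let s : PySem.Set Int := PySem.Set.ofList l1
  l2.all (fun x => s.contains x)

-- ===== PRECONDITION & SPEC =====
-- On inputs where some element of l2 is absent from l1 but every such absent element occurs at
-- least twice in l2, A returns True (its count==1 test misses duplicated absentees) while B
-- returns False, the documented 'every element of l2 exists in l1' behaviour.
def D_l1_contains_l2 (l1 : List Int) (l2 : List Int) : Prop :=
  (∃ k ∈ l2, k ∉ l1) ∧ (∀ k ∈ l2, k ∉ l1 → l2.count k ≠ 1)
instance (l1 : List Int) (l2 : List Int) : Decidable (D_l1_contains_l2 l1 l2) := by
  unfold D_l1_contains_l2; infer_instance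

def Spec_l1_contains_l2 (l1 : List Int) (l2 : List Int) (out : Bool) : Prop :=
  ¬ D_l1_contains_l2 l1 l2 → out = l1_contains_l2_alt l1 l2
instance (l1 : List Int) (l2 : List Int) (out : Bool) : Decidable (Spec_l1_contains_l2 l1 l2 out) := by
  unfold Spec_l1_contains_l2; infer_instance

def pvDiffWitness_l1_contains_l2 : List Int × List Int := ([], [1, 1])
def pvDiffWitnessOut_l1_contains_l2 : Bool × Bool := (true, false)

-- ===== CLAIM =====
def Claim_unchanged_l1_contains_l2 : Prop := ∀ (l1 : List Int) (l2 : List Int), Dom_l1_contains_l2 l1 l2 → Spec_l1_contains_l2 l1 l2 (l1_contains_l2 l1 l2)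
def Claim_changed_l1_contains_l2 : Prop := Dom_l1_contains_l2 (pvDiffWitness_l1_contains_l2.1) (pvDiffWitness_l1_contains_l2.2) ∧ D_l1_contains_l2 (pvDiffWitness_l1_contains_l2.1) (pvDiffWitness_l1_contains_l2.2) ∧ l1_contains_l2 (pvDiffWitness_l1_contains_l2.1) (pvDiffWitness_l1_contains_l2.2) = pvDiffWitnessOut_l1_contains_l2.1 ∧ l1_contains_l2_alt (pvDiffWitness_l1_contains_l2.1) (pvDiffWitness_l1_contains_l2.2) = pvDiffWitnessOut_l1_contains_l2.2 ∧ pvDiffWitnessOut_l1_contains_l2.1 ≠ pvDiffWitnessOut_l1_contains_l2.2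
def Claim_exact_l1_contains_l2 : Prop := ∀ (l1 : List Int) (l2 : List Int), Dom_l1_contains_l2 l1 l2 → D_l1_contains_l2 l1 l2 → l1_contains_l2 l1 l2 ≠ l1_contains_l2_alt l1 l2

-- ===== LEMMAS AND PROOFS =====

-- A's first loop builds exactly Counter(l2)
theorem firstLoop_eq_counter (l2 : List Int) :
    l2.foldl (fun d x => if d.contains x = false then d.insert x 1 else d.modify x 0 (· + 1))
      PySem.Dict.empty = PySem.Dict.counter l2 := by
  have hf : (fun (d : PySem.Dict Int Int) (x : Int) =>
      if d.contains x = false then d.insert x 1 else d.modify x 0 (· + 1))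
      = (fun d x => d.modify x 0 (· + 1)) := by
    funext d x
    by_cases h : d.contains x = false
    · simp [h, PySem.Dict.modify, PySem.Dict.getD_of_not_contains (h := h)]
    · simp [h]
  rw [hf, PySem.Dict.counter_eq_foldl]

-- A's second loop never changes the key list
theorem secondLoop_keys (l1 : List Int) (d : PySem.Dict Int Int) :
    (l1.foldl (fun d x => if d.contains x = true then d.modify x 0 (· + 1) else d) d).keys
      = d.keys := by
  induction l1 generalizing d with
  | nil => rfl
  | cons x xs ih =>
    simp only [List.foldl_cons]
    by_cases h : d.contains x = true
    · rw [if_pos h, ih, PySem.Dict.keys_modify, PySem.Dict.keys_insert_of_contains]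
      simpa [PySem.Dict.contains_insert] using h
    · rw [if_neg h, ih]

-- A's second loop adds count-in-l1 to every key already present
theorem secondLoop_getD (l1 : List Int) (d : PySem.Dict Int Int) (k : Int) :
    (l1.foldl (fun d x => if d.contains x = true then d.modify x 0 (· + 1) else d) d).getD k 0
      = d.getD k 0 + (if d.contains k = true then (l1.count k : Int) else 0) := by
  induction l1 generalizing d with
  | nil => simp
  | cons x xs ih =>
    simp only [List.foldl_cons]
    by_cases hx : d.contains x = true
    · rw [if_pos hx, ih]
      rw [PySem.Dict.getD_modify, PySem.Dict.contains_modify, List.count_cons]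
      by_cases hk : k = x
      · subst hk; simp [hx]; ring
      · have hxk : (x == k) = false := by simp; exact fun h => hk h.symm
        simp [hk, hxk]
    · rw [if_neg hx, ih, List.count_cons]
      by_cases hk : k = x
      · subst hk; simp [hx]
      · have hxk : (x == k) = false := by simp; exact fun h => hk h.symm
        simp [hxk]

-- with distinct keys, scanning the values is scanning getD over the keys
theorem values_any_eq_keys_any (d : PySem.Dict Int Int) (h : d.keys.Nodup) :
    d.values.any (fun v => v == 1) = d.keys.any (fun k => d.getD k 0 == 1) := by
  rw [Bool.eq_iff_iff]
  simp only [PySem.Dict.values, PySem.Dict.keys, List.any_map, List.any_eq_true,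
    Function.comp, beq_iff_eq]
  constructor
  · rintro ⟨⟨k, v⟩, hm, hv⟩
    exact ⟨(k, v), hm, by rw [PySem.Dict.getD_of_mem_items d hm h]; exact hv⟩
  · rintro ⟨⟨k, v⟩, hm, hv⟩
    exact ⟨(k, v), hm, by rw [← PySem.Dict.getD_of_mem_items d hm h 0]; exact hv⟩

-- characterisation of A: False exactly when some element of l2 occurs once there and never in l1
theorem a_false_iff (l1 l2 : List Int) :
    l1_contains_l2 l1 l2 = false ↔ ∃ k ∈ l2, l2.count k = 1 ∧ k ∉ l1 := by
  unfold l1_contains_l2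
  simp only [firstLoop_eq_counter]
  set F := (List.foldl (fun d x => if d.contains x = true then d.modify x 0 (· + 1) else d)
    (PySem.Dict.counter l2) l1) with hF
  have hnod : F.keys.Nodup := by
    rw [hF, secondLoop_keys]; exact PySem.Dict.nodup_keys_counter l2
  rw [values_any_eq_keys_any F hnod]
  have hkeys : F.keys = PySem.Set.ofList l2 := by
    rw [hF, secondLoop_keys, PySem.Dict.keys_counter]
  rw [hkeys]
  constructor
  · intro h
    by_cases hany : (PySem.Set.ofList l2).any (fun k => F.getD k 0 == 1) = true
    · obtain ⟨k, hm, hv⟩ := List.any_eq_true.mp hany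
      have hk2 : k ∈ l2 := (PySem.Set.mem_ofList l2 k).mp hm
      have hgd : F.getD k 0 = (l2.count k : Int) + (l1.count k : Int) := by
        rw [hF, secondLoop_getD]
        simp [PySem.Dict.getD_counter, PySem.Dict.contains_counter, List.contains_eq_mem, hk2]
      rw [hgd] at hv
      have hv' : (l2.count k : Int) + (l1.count k : Int) = 1 := by simpa using hv
      have h2 : 1 ≤ l2.count k := List.one_le_count_iff.mpr hk2
      have hc1 : l2.count k = 1 ∧ l1.count k = 0 := by omega
      exact ⟨k, hk2, hc1.1, List.count_eq_zero.mp hc1.2⟩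
    · simp [hany] at h
  · rintro ⟨k, hk2, hc1, hnm⟩
    have hany : (PySem.Set.ofList l2).any (fun k => F.getD k 0 == 1) = true := by
      refine List.any_eq_true.mpr ⟨k, (PySem.Set.mem_ofList l2 k).mpr hk2, ?_⟩
      have hgd : F.getD k 0 = (l2.count k : Int) + (l1.count k : Int) := by
        rw [hF, secondLoop_getD]
        simp [PySem.Dict.getD_counter, PySem.Dict.contains_counter, List.contains_eq_mem, hk2]
      have h0 : l1.count k = 0 := List.count_eq_zero.mpr hnm
      rw [hgd, hc1, h0]; decide
    simp [hany]

-- characterisation of B: False exactly when some element of l2 is absent from l1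
theorem b_false_iff (l1 l2 : List Int) :
    l1_contains_l2_alt l1 l2 = false ↔ ∃ k ∈ l2, k ∉ l1 := by
  unfold l1_contains_l2_alt
  simp [PySem.Set.contains_eq_listContains, List.contains_eq_mem,
    PySem.Set.mem_ofList]

-- ===== VERDICT =====
theorem l1_contains_l2_spec : Claim_unchanged_l1_contains_l2 := by
  intro l1 l2 _ hD
  unfold D_l1_contains_l2 at hD
  push_neg at hD
  by_cases hmiss : ∃ k ∈ l2, k ∉ l1
  · obtain ⟨k, hk2, hnm, hc⟩ := hD hmiss
    have hA : l1_contains_l2 l1 l2 = false := (a_false_iff l1 l2).mpr ⟨k, hk2, hc, hnm⟩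
    have hB : l1_contains_l2_alt l1 l2 = false := (b_false_iff l1 l2).mpr ⟨k, hk2, hnm⟩
    rw [hA, hB]
  · have hA : l1_contains_l2 l1 l2 ≠ false := fun h => by
      obtain ⟨k, hk2, _, hnm⟩ := (a_false_iff l1 l2).mp h
      exact hmiss ⟨k, hk2, hnm⟩
    have hB : l1_contains_l2_alt l1 l2 ≠ false := fun h =>
      hmiss ((b_false_iff l1 l2).mp h)
    rw [eq_true_of_ne_false hA, eq_true_of_ne_false hB]

theorem l1_contains_l2_changed : Claim_changed_l1_contains_l2 := by
  unfold Claim_changed_l1_contains_l2; decide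

theorem l1_contains_l2_tight : Claim_exact_l1_contains_l2 := by
  intro l1 l2 _ hD
  obtain ⟨⟨k, hk2, hnm⟩, hdup⟩ := hD
  have hB : l1_contains_l2_alt l1 l2 = false := (b_false_iff l1 l2).mpr ⟨k, hk2, hnm⟩
  have hA : l1_contains_l2 l1 l2 = true := by
    rw [← Bool.not_eq_false]
    intro h
    obtain ⟨j, hj2, hc, hjm⟩ := (a_false_iff l1 l2).mp h
    exact hdup j hj2 hjm hc
  rw [hA, hB]; decide
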